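-- pv_equiv track=rewrite | github.com/MrBrantCode/unitest_baseline | mut_generate/mist_train_cf/cf_86112/solution.py | multiply_primes
-- ===== SOURCE A (Python) =====
-- def multiply_primes(num_list):
--     pri_nums = [2, 3, 5, 7]  # prime numerals 0-9
--     result = 1
--     for num in num_list:
--         for digit in str(num):
--             if int(digit) in pri_nums:
--                 result *= int(digit)
--     return result
-- ===== SOURCE B (Python) =====
-- def multiply_primes(num_list):
--     # Purely arithmetic: extract decimal digits of each number with divmod
--     # instead of converting to a string; multiply the prime ones as they appear.
--     result = 1
--     for num in num_list:
--         n = abs(num)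
--         while True:
--             n, d = divmod(n, 10)
--             if d in (2, 3, 5, 7):
--                 result *= d
--             if n == 0:
--                 break
--     return result
-- ===== Notes on version B (the rewrite author's own statement) =====
-- stated objective: alternative
-- what changed: B never converts numbers to strings: it extracts each number's decimal digits arithmetically with divmod(n, 10) in a do-while loop over abs(num) and multiplies the prime digits, instead of A's str(num) scan with int() per character; B therefore returns a value on lists with negative numbers where A raises ValueError.
-- crash fix: On any list containing a negative number A raises ValueError (int('-') on the minus sign); B works on abs(num) and returns the product of the prime digits, e.g. multiply_primes([-23]) = 6. — e.g. on multiply_primes([-23]): A raises ValueError, B returns 6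
import Mathlib
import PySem

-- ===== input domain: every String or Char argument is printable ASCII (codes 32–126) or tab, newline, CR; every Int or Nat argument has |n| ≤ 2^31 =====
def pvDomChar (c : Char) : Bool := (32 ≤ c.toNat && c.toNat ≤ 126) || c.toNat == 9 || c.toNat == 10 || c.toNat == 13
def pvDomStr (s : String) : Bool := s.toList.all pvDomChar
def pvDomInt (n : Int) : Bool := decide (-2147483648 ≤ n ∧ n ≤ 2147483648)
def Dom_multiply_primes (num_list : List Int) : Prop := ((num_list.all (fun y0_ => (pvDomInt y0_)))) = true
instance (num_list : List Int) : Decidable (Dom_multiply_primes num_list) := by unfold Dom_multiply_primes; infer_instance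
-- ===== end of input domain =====

-- B extracts each number's decimal digits arithmetically with divmod(n, 10) on abs(num)
-- instead of A's str(num) character scan with int() per character (objective: alternative).

-- ===== PORT A =====
-- inner step: "if int(digit) in pri_nums: result *= int(digit)"; ofChars? none = ValueError
-- (reached only for the '-' of a negative num; those inputs are excluded by Pre_)
def pvAStep (result : Int) (digit : Char) : Int :=
  match PySem.Int.ofChars? [digit] with
  | some v => if [(2 : Int), 3, 5, 7].contains v then result * v else result
  | none => result

def multiply_primes (num_list : List Int) : Int :=
  num_list.foldl (fun result num => (PySem.Int.toChars num).foldl pvAStep result) 1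

-- ===== PORT B =====
-- the "while True: n, d = divmod(n, 10); …; if n == 0: break" loop of Source B;
-- its argument is abs(num), a Nat, on which Python's divmod(n, 10) is exactly Nat./ and Nat.%
def pvBLoop (result : Int) (n : Nat) : Int :=
  let n' := n / 10
  let d := n % 10
  let r := if [(2 : Int), 3, 5, 7].contains (d : Int) then result * (d : Int) else result
  if n' = 0 then r else pvBLoop r n'
termination_by n
decreasing_by
  have : 10 ≤ n := by
    by_contra h
    exact absurd (Nat.div_eq_of_lt (by omega)) (by omega)
  omega

def multiply_primes_alt (num_list : List Int) : Int :=
  num_list.foldl (fun result num => pvBLoop result num.natAbs) 1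

-- ===== PRECONDITION & SPEC =====
-- Pre_ excludes lists containing a negative number: there str(num) contains '-' and A's int(digit) raises ValueError.
def Pre_multiply_primes (num_list : List Int) : Prop := ∀ n ∈ num_list, 0 ≤ n
instance (num_list : List Int) : Decidable (Pre_multiply_primes num_list) := by unfold Pre_multiply_primes; infer_instance
def pvWitness_multiply_primes : List Int := [25, 307, 0]

-- On any list containing a negative number A raises ValueError (int('-')); B works on abs(num)
-- and returns the product of the prime digits.
def Raises_multiply_primes (num_list : List Int) : Prop := ∃ n ∈ num_list, n < 0
instance (num_list : List Int) : Decidable (Raises_multiply_primes num_list) := by unfold Raises_multiply_primes; infer_instance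
def pvRaiseWitness_multiply_primes : List Int := [-23]
def pvRaiseWitnessOut_multiply_primes : Int := 6

def Spec_multiply_primes (num_list : List Int) (out : Int) : Prop := out = multiply_primes_alt num_list
instance (num_list : List Int) (out : Int) : Decidable (Spec_multiply_primes num_list out) := by unfold Spec_multiply_primes; infer_instance

-- ===== CLAIM (what is proved, stated in full; the proofs are below) =====
def Claim_equal_multiply_primes : Prop := ∀ (num_list : List Int), Dom_multiply_primes num_list → Pre_multiply_primes num_list → Spec_multiply_primes num_list (multiply_primes num_list)
def Claim_raises_multiply_primes : Prop := (∀ (num_list : List Int), Dom_multiply_primes num_list → Raises_multiply_primes num_list → ¬ Pre_multiply_primes num_list) ∧ (Dom_multiply_primes (pvRaiseWitness_multiply_primes) ∧ Raises_multiply_primes (pvRaiseWitness_multiply_primes) ∧ multiply_primes_alt (pvRaiseWitness_multiply_primes) = pvRaiseWitnessOut_multiply_primes)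

-- ===== LEMMAS AND PROOFS =====
-- multiplicative weight of a character (A multiplies by it) and of a numeric digit (B multiplies by it)
def pvWeight (c : Char) : Int :=
  if c = '2' then 2 else if c = '3' then 3 else if c = '5' then 5 else if c = '7' then 7 else 1

def pvWd (d : Nat) : Int :=
  if d = 2 then 2 else if d = 3 then 3 else if d = 5 then 5 else if d = 7 then 7 else 1

-- the common value both sides compute for one number n : Nat
def pvD (n : Nat) : Int := ((Nat.digits 10 n).map pvWd).prod

def pvDigits10 : List Char := ['0', '1', '2', '3', '4', '5', '6', '7', '8', '9']

theorem pvMem_toDigitsCore (f : Nat) : ∀ (n : Nat) (ds : List Char) (c : Char),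
    c ∈ Nat.toDigitsCore 10 f n ds → c ∈ ds ∨ c ∈ pvDigits10 := by
  induction f with
  | zero => intro n ds c hc; exact Or.inl hc
  | succ f ih =>
    intro n ds c hc
    have hd : (n % 10).digitChar ∈ pvDigits10 := by
      have h10 : n % 10 < 10 := Nat.mod_lt _ (by omega)
      interval_cases h : n % 10 <;> decide
    simp only [Nat.toDigitsCore] at hc
    split at hc
    · rcases List.mem_cons.mp hc with rfl | hc
      · exact Or.inr hd
      · exact Or.inl hc
    · rcases ih _ _ _ hc with h | h
      · rcases List.mem_cons.mp h with rfl | h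
        · exact Or.inr hd
        · exact Or.inl h
      · exact Or.inr h

theorem pvAStep_eq_weight (r : Int) (c : Char) (hc : c ∈ pvDigits10) :
    pvAStep r c = r * pvWeight c := by
  fin_cases hc <;> first | rfl | exact (mul_one r).symm

theorem pvWeight_digitChar (d : Nat) (hd : d < 10) : pvWeight d.digitChar = pvWd d := by
  interval_cases d <;> decide

-- pvD unfolds one decimal digit at a time
theorem pvD_zero : pvD 0 = 1 := by simp [pvD]

theorem pvD_succ (n : Nat) (hp : 0 < n) : pvD n = pvWd (n % 10) * pvD (n / 10) := by
  unfold pvD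
  rw [Nat.digits_def' (b := 10) (by norm_num) hp]
  simp

-- the digit-character list built by Nat.toDigitsCore has weight-product pvD n
theorem pvProd_toDigitsCore (f : Nat) : ∀ (n : Nat) (ds : List Char), n < f →
    ((Nat.toDigitsCore 10 f n ds).map pvWeight).prod = pvD n * ((ds.map pvWeight).prod) := by
  induction f with
  | zero => intro n ds h; omega
  | succ f ih =>
    intro n ds h
    have h10 : n % 10 < 10 := Nat.mod_lt _ (by omega)
    simp only [Nat.toDigitsCore]
    split
    · rename_i hz
      have hn : n < 10 := by omega
      simp only [List.map_cons, List.prod_cons, pvWeight_digitChar _ h10]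
      rcases Nat.eq_zero_or_pos n with rfl | hp
      · simp [pvD, pvWd]
      · rw [pvD_succ n hp, hz, pvD_zero]
        ring
    · rename_i hz
      have hp : 0 < n := by omega
      have hlt : n / 10 < f := by omega
      rw [ih _ _ hlt]
      simp only [List.map_cons, List.prod_cons, pvWeight_digitChar _ h10]
      rw [pvD_succ n hp]
      ring

theorem pvInnerA (l : List Char) (hl : ∀ c ∈ l, c ∈ pvDigits10) : ∀ (r : Int),
    l.foldl pvAStep r = r * (l.map pvWeight).prod := by
  induction l with
  | nil => intro r; simp
  | cons c l ih =>
    intro r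
    have hc := hl c (by simp)
    simp only [List.foldl_cons, List.map_cons, List.prod_cons]
    rw [pvAStep_eq_weight r c hc, ih (fun x hx => hl x (by simp [hx]))]
    ring

-- A's inner loop over str(num) (num ≥ 0) computes r * pvD num
theorem pvInnerA_eq (n : Int) (hn : 0 ≤ n) (r : Int) :
    (PySem.Int.toChars n).foldl pvAStep r = r * pvD n.toNat := by
  have hchars : ∀ c ∈ PySem.Int.toChars n, c ∈ pvDigits10 := by
    intro c hc
    unfold PySem.Int.toChars at hc
    rw [if_neg (by omega)] at hc
    rcases pvMem_toDigitsCore _ _ _ _ hc with h | h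
    · simp at h
    · exact h
  rw [pvInnerA _ hchars]
  congr 1
  unfold PySem.Int.toChars
  rw [if_neg (by omega)]
  unfold Nat.toDigits
  rw [pvProd_toDigitsCore _ _ _ (by omega)]
  simp

-- B's divmod loop computes the same value
theorem pvBLoop_eq (n : Nat) : ∀ (r : Int), pvBLoop r n = r * pvD n := by
  induction n using Nat.strong_induction_on with
  | _ n ih =>
    intro r
    rw [pvBLoop]
    split
    · rename_i hz
      have h10 : n % 10 < 10 := Nat.mod_lt _ (by omega)
      rcases Nat.eq_zero_or_pos n with rfl | hp
      · simp [pvD_zero]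
      · rw [pvD_succ n hp, hz, pvD_zero]
        interval_cases h : n % 10 <;> simp [pvWd]
    · rename_i hz
      have hp : 0 < n := by omega
      have hlt : n / 10 < n := by omega
      rw [ih _ hlt, pvD_succ n hp]
      have h10 : n % 10 < 10 := Nat.mod_lt _ (by omega)
      interval_cases h : n % 10 <;> simp [pvWd] <;> ring

-- both outer folds, over lists of nonnegative ints
theorem pvOuter (l : List Int) (hl : ∀ n ∈ l, 0 ≤ n) : ∀ (r : Int),
    l.foldl (fun result num => (PySem.Int.toChars num).foldl pvAStep result) r =
      l.foldl (fun result num => pvBLoop result num.natAbs) r := by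
  induction l with
  | nil => intro r; rfl
  | cons n l ih =>
    intro r
    have hn := hl n (by simp)
    simp only [List.foldl_cons]
    have hna : n.toNat = n.natAbs := by omega
    rw [pvInnerA_eq n hn, pvBLoop_eq, hna, ih (fun x hx => hl x (by simp [hx]))]

-- ===== VERDICT (by name: the statement is the Claim_ definition above) =====
theorem multiply_primes_spec : Claim_equal_multiply_primes := by
  intro num_list _ hpre
  unfold Spec_multiply_primes multiply_primes multiply_primes_alt
  exact pvOuter num_list hpre 1

@[simp] theorem multiply_primes_raises : Claim_raises_multiply_primes := by
  unfold Claim_raises_multiply_primes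
  refine ⟨?_, by decide, by decide, ?_⟩
  · rintro num_list _ ⟨n, hn, hlt⟩ hpre
    exact absurd (hpre n hn) (by omega)
  · show multiply_primes_alt [-23] = 6
    simp only [multiply_primes_alt, List.foldl]
    rw [pvBLoop_eq]
    decide
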